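-- pv_equiv track=rewrite | github.com/serweryn617/AoC | year23/puzzle8/puzzle.py | get_repeats
-- ===== SOURCE A (Python) =====
-- def get_repeats(key, directions, maps):
--     visited = {}  # using dict is way faster than list
--     num_steps = 0
--
--     while True:
--         for dir_num, d in enumerate(directions):
--             if (key, dir_num) in visited:
--                 initial = visited[(key, dir_num)]
--                 loop = num_steps - initial
--                 return initial, loop
--
--             visited[(key, dir_num)] = num_steps
--
--             key = maps[key][d]
--             num_steps += 1
-- ===== SOURCE B (Python) =====
-- def _race(ft, fh, t, h, c):
--     # advance t by ft and h by fh, counting, until the pointers meet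
--     while t != h:
--         t = ft(t)
--         h = fh(h)
--         c += 1
--     return t, h, c
--
--
-- def get_repeats(key, directions, maps):
--     # Floyd's cycle detection over the state-transition function
--     # f((key, i)) = (maps[key][directions[i]], (i + 1) % n): two pointers
--     # and counters instead of a visited dictionary.
--     n = len(directions)
--
--     def f(s):
--         k, i = s
--         return maps[k][directions[i]], (i + 1) % n
--
--     start = (key, 0)
--     # phase 1: slow/fast pointers until they meet somewhere on the loop
--     _, hare, _ = _race(f, lambda s: f(f(s)), f(start), f(f(start)), 1)
--     # phase 2: recover the tail length mu
--     tortoise, _, mu = _race(f, f, start, hare, 0)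
--     # phase 3: measure the loop length lam
--     _, _, lam = _race(lambda s: s, f, tortoise, f(tortoise), 1)
--     return mu, lam
-- ===== Notes on version B (the rewrite author's own statement) =====
-- stated objective: alternative
-- what changed: Replaced the visited-dictionary walk (hashing every state with its step number) by Floyd's two-pointer cycle detection over the state-transition function f((key,i)) = (maps[key][directions[i]], (i+1)%n): a slow/fast race to a meeting point, a second race to recover the tail length mu, and a third to measure the loop length lam, keeping only two pointers and counters instead of a dict of all visited states.
-- outside the precondition, e.g. on get_repeats('A', ['L'], {'A': {'L': 'A'}, 'B': {}}): A returns (0, 1), B returns (0, 1)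
import Mathlib
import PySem

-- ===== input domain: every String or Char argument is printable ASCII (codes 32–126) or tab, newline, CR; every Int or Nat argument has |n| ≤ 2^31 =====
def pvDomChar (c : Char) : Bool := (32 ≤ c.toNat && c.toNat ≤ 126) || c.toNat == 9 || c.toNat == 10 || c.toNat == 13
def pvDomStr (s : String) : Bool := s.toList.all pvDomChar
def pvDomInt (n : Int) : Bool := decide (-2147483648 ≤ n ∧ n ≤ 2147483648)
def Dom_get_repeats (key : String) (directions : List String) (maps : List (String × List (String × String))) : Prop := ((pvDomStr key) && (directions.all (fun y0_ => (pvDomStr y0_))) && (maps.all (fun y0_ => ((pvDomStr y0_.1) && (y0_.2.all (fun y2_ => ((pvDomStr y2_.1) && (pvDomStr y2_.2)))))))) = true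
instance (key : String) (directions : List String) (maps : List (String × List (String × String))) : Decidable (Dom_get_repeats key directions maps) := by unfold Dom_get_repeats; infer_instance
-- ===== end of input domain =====

-- B replaces A's visited-dictionary walk by Floyd's two-pointer cycle detection (alternative
-- algorithm: O(1) extra space instead of a dict of all visited states; same return value).
-- Under Pre_ no lookup misses and both walks terminate; the `.getD`/fuel fallbacks in the
-- ports below only make the Lean functions total and are never reached under Pre_.

-- ===== PORT A =====
-- inner `for dir_num, d in enumerate(directions)` loop; early `return` = Sum.inl
def grInner (maps : List (String × List (String × String))) :
    List (Int × String) → PySem.Dict (String × Int) Int → String → Int →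
    (Int × Int) ⊕ (PySem.Dict (String × Int) Int × String × Int)
  | [], visited, key, num_steps => .inr (visited, key, num_steps)
  | (dir_num, d) :: rest, visited, key, num_steps =>
    match visited.get? (key, dir_num) with
    | some initial => .inl (initial, num_steps - initial)
    | none =>
      grInner maps rest (visited.insert (key, dir_num) num_steps)
        ((PySem.Dict.mk ((PySem.Dict.mk maps).getD key [])).getD d "")  -- key = maps[key][d]
        (num_steps + 1)

-- outer `while True` loop, with fuel (A terminates on every input Pre_ admits; fuel suffices there)
def grOuter (maps : List (String × List (String × String))) (directions : List String) :
    Nat → PySem.Dict (String × Int) Int → String → Int → Option (Int × Int)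
  | 0, _, _, _ => none
  | fuel+1, visited, key, num_steps =>
    match grInner maps (PySem.List.enumerate directions) visited key num_steps with
    | .inl r => some r
    | .inr (v, k, t) => grOuter maps directions fuel v k t

def get_repeats (key : String) (directions : List String) (maps : List (String × List (String × String))) : Int × Int :=
  (grOuter maps directions (maps.length + 2) PySem.Dict.empty key 0).getD (0, 0)

-- ===== PORT B =====
-- f((k, i)) = (maps[k][directions[i]], (i + 1) % n)
def grStep (directions : List String) (maps : List (String × List (String × String)))
    (s : String × Int) : String × Int :=
  ((PySem.Dict.mk ((PySem.Dict.mk maps).getD s.1 [])).getD (PySem.List.pyGetD directions s.2 "") "",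
   PySem.Int.mod (s.2 + 1) (directions.length : Int))

-- `_race`: advance t by ft and h by fh, counting, until the pointers meet (fuel for totality)
def grRace (ft fh : (String × Int) → (String × Int)) :
    Nat → (String × Int) → (String × Int) → Int →
    Option ((String × Int) × (String × Int) × Int)
  | 0, _, _, _ => none
  | fuel+1, t, h, c => if t = h then some (t, h, c) else grRace ft fh fuel (ft t) (fh h) (c + 1)

def get_repeats_alt (key : String) (directions : List String) (maps : List (String × List (String × String))) : Int × Int :=
  let f := grStep directions maps
  let start : String × Int := (key, 0)
  let fuel := maps.length * directions.length + 2
  match grRace f (fun s => f (f s)) fuel (f start) (f (f start)) 1 with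
  | none => (0, 0)
  | some (_, hare, _) =>
    match grRace f f fuel start hare 0 with
    | none => (0, 0)
    | some (tortoise, _, mu) =>
      match grRace (fun s => s) f fuel tortoise (f tortoise) 1 with
      | none => (0, 0)
      | some (_, _, lam) => (mu, lam)

-- ===== PRECONDITION & SPEC =====
-- A returns normally iff directions ≠ [] and every lookup along the walk succeeds (else it
-- raises KeyError, or loops forever when directions = []). Reachability of a key is not a
-- closed-form condition, so Pre_ requires the slightly stronger GLOBAL closure: every row of
-- maps maps every direction to a key of maps. On excluded inputs where A still returns (an
-- unreachable row missing a direction), B returns the same value — both walks only ever look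
-- up reachable states; the exclusion is only this narrowing, stated here.
def Pre_get_repeats (key : String) (directions : List String) (maps : List (String × List (String × String))) : Prop :=
  directions ≠ [] ∧ (PySem.Dict.mk maps).contains key = true ∧
  ∀ p ∈ maps, ∀ d ∈ directions,
    (PySem.Dict.mk p.2).contains d = true ∧
    (PySem.Dict.mk maps).contains ((PySem.Dict.mk p.2).getD d "") = true
instance (key : String) (directions : List String) (maps : List (String × List (String × String))) : Decidable (Pre_get_repeats key directions maps) := by unfold Pre_get_repeats; infer_instance

def pvWitness_get_repeats : String × List String × (List (String × List (String × String))) :=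
  ("AAA", ["L", "R"], [("AAA", [("L", "BBB"), ("R", "AAA")]), ("BBB", [("L", "AAA"), ("R", "BBB")])])

def Spec_get_repeats (key : String) (directions : List String) (maps : List (String × List (String × String))) (out : Int × Int) : Prop := out = get_repeats_alt key directions maps
instance (key : String) (directions : List String) (maps : List (String × List (String × String))) (out : Int × Int) : Decidable (Spec_get_repeats key directions maps out) := by unfold Spec_get_repeats; infer_instance

-- ===== CLAIM (what is proved, stated in full; the proofs are below) =====
def Claim_equal_get_repeats : Prop := ∀ (key : String) (directions : List String) (maps : List (String × List (String × String))), Dom_get_repeats key directions maps → Pre_get_repeats key directions maps → Spec_get_repeats key directions maps (get_repeats key directions maps)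

-- ===== LEMMAS AND PROOFS =====

-- The orbit of the state-transition function from (key, 0); both ports walk it.
def grOrb (key : String) (directions : List String) (maps : List (String × List (String × String)))
    (t : Nat) : String × Int :=
  (grStep directions maps)^[t] (key, 0)

-- tail length μ: first index whose state is a periodic point (junk 0 when no repeat exists)
noncomputable def grMu (key : String) (directions : List String) (maps : List (String × List (String × String))) : Nat :=
  letI := Classical.decPred (fun m => grOrb key directions maps m ∈ Function.periodicPts (grStep directions maps))
  letI := Classical.dec (∃ m, grOrb key directions maps m ∈ Function.periodicPts (grStep directions maps))
  if h : ∃ m, grOrb key directions maps m ∈ Function.periodicPts (grStep directions maps) then Nat.find h else 0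

-- loop length λ
noncomputable def grLam (key : String) (directions : List String) (maps : List (String × List (String × String))) : Nat :=
  Function.minimalPeriod (grStep directions maps) (grOrb key directions maps (grMu key directions maps))

theorem grOrb_succ (key : String) (directions : List String) (maps : List (String × List (String × String))) (t : Nat) :
    grOrb key directions maps (t+1) = grStep directions maps (grOrb key directions maps t) := by
  simp [grOrb, Function.iterate_succ_apply']

theorem grOrb_add (key : String) (directions : List String) (maps : List (String × List (String × String))) (k a : Nat) :
    grOrb key directions maps (k + a) = (grStep directions maps)^[k] (grOrb key directions maps a) := by
  simp [grOrb, Function.iterate_add_apply]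

-- closure invariant: the key stays a key of maps, the direction index is t % n
theorem grOrb_closure (key : String) (directions : List String) (maps : List (String × List (String × String)))
    (hpre : Pre_get_repeats key directions maps) (t : Nat) :
    (PySem.Dict.mk maps).contains (grOrb key directions maps t).1 = true ∧
    (grOrb key directions maps t).2 = ((t % directions.length : Nat) : Int) := by
  have hn : 0 < directions.length := List.length_pos_of_ne_nil hpre.1
  induction t with
  | zero => exact ⟨hpre.2.1, by simp [grOrb]⟩
  | succ t ih =>
    rw [grOrb_succ]
    obtain ⟨ih1, ih2⟩ := ih
    set s := grOrb key directions maps t with hs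
    obtain ⟨row, hrow⟩ : ∃ row, (PySem.Dict.mk maps).get? s.1 = some row := by
      rw [PySem.Dict.contains_eq_isSome_get?] at ih1
      exact Option.isSome_iff_exists.mp ih1
    have hmem : (s.1, row) ∈ maps := PySem.Dict.mem_items_of_get?_eq_some _ hrow
    have hd : PySem.List.pyGetD directions s.2 "" = directions[t % directions.length]'(Nat.mod_lt _ hn) := by
      rw [ih2, PySem.List.pyGetD_natCast]
      exact List.getD_eq_getElem directions "" (Nat.mod_lt _ hn)
    have hdm : directions[t % directions.length]'(Nat.mod_lt _ hn) ∈ directions :=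
      List.getElem_mem _
    obtain ⟨hc1, hc2⟩ := hpre.2.2 (s.1, row) hmem _ hdm
    constructor
    · show (PySem.Dict.mk maps).contains
        ((PySem.Dict.mk ((PySem.Dict.mk maps).getD s.1 [])).getD (PySem.List.pyGetD directions s.2 "") "") = true
      rw [PySem.Dict.getD_of_get?_eq_some _ _ hrow, hd]
      exact hc2
    · show PySem.Int.mod (s.2 + 1) (directions.length : Int) = _
      rw [ih2, PySem.Int.mod_eq_emod_of_pos (by exact_mod_cast hn)]
      have h1 : ((t % directions.length : Nat) : Int) + 1 = ((t % directions.length + 1 : Nat) : Int) := by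
        push_cast; ring
      rw [h1, ← Int.natCast_mod]
      norm_num [Nat.mod_add_mod]

-- pigeonhole: the orbit repeats within maps.length * directions.length steps
theorem grOrb_repeats (key : String) (directions : List String) (maps : List (String × List (String × String)))
    (hpre : Pre_get_repeats key directions maps) :
    ∃ i j, i < j ∧ j ≤ maps.length * directions.length ∧
      grOrb key directions maps i = grOrb key directions maps j := by
  have hn : 0 < directions.length := List.length_pos_of_ne_nil hpre.1
  set n := directions.length
  set L := maps.length
  set tgt : Finset (String × Int) :=
    (maps.map Prod.fst).toFinset ×ˢ ((Finset.range n).image (fun i : Nat => (i : Int))) with htgt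
  have hmapsto : ∀ a ∈ Finset.range (L * n + 1), grOrb key directions maps a ∈ tgt := by
    intro a _
    obtain ⟨h1, h2⟩ := grOrb_closure key directions maps hpre a
    rw [htgt, Finset.mem_product]
    constructor
    · rw [PySem.Dict.contains_iff_mem_keys] at h1
      simpa using h1
    · rw [Finset.mem_image]
      exact ⟨a % n, Finset.mem_range.mpr (Nat.mod_lt _ hn), h2.symm⟩
  have hcard : tgt.card < (Finset.range (L * n + 1)).card := by
    rw [Finset.card_range]
    have h1 : tgt.card ≤ L * n := by
      rw [htgt, Finset.card_product]
      have ha : (maps.map Prod.fst).toFinset.card ≤ L := by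
        simpa using List.toFinset_card_le (maps.map Prod.fst)
      have hb : ((Finset.range n).image (fun i : Nat => (i : Int))).card ≤ n := by
        simpa using Finset.card_image_le (s := Finset.range n) (f := fun i : Nat => (i : Int))
      exact Nat.mul_le_mul ha hb
    omega
  obtain ⟨a, ha, b, hb, hne, heq⟩ :=
    Finset.exists_ne_map_eq_of_card_lt_of_maps_to hcard hmapsto
  rw [Finset.mem_range] at ha hb
  rcases Nat.lt_or_ge a b with h | h
  · exact ⟨a, b, h, by omega, heq⟩
  · exact ⟨b, a, by omega, by omega, heq.symm⟩

theorem grOrb_periodic_ex (key : String) (directions : List String) (maps : List (String × List (String × String)))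
    (hpre : Pre_get_repeats key directions maps) :
    ∃ m, grOrb key directions maps m ∈ Function.periodicPts (grStep directions maps) := by
  obtain ⟨i, j, hij, _, he⟩ := grOrb_repeats key directions maps hpre
  refine ⟨i, j - i, by omega, ?_⟩
  show (grStep directions maps)^[j - i] (grOrb key directions maps i) = grOrb key directions maps i
  rw [← grOrb_add, show j - i + i = j from by omega, ← he]

theorem grMu_spec (key : String) (directions : List String) (maps : List (String × List (String × String)))
    (hpre : Pre_get_repeats key directions maps) :
    grOrb key directions maps (grMu key directions maps) ∈ Function.periodicPts (grStep directions maps) := by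
  have hper := grOrb_periodic_ex key directions maps hpre
  letI := Classical.decPred (fun m => grOrb key directions maps m ∈ Function.periodicPts (grStep directions maps))
  unfold grMu
  rw [dif_pos hper]
  exact Nat.find_spec hper

theorem grMu_min (key : String) (directions : List String) (maps : List (String × List (String × String)))
    (m : Nat) (hm : m < grMu key directions maps) :
    grOrb key directions maps m ∉ Function.periodicPts (grStep directions maps) := by
  letI := Classical.decPred (fun m => grOrb key directions maps m ∈ Function.periodicPts (grStep directions maps))
  unfold grMu at hm
  by_cases h : ∃ m, grOrb key directions maps m ∈ Function.periodicPts (grStep directions maps)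
  · rw [dif_pos h] at hm
    exact Nat.find_min h hm
  · rw [dif_neg h] at hm
    omega

theorem grLam_pos (key : String) (directions : List String) (maps : List (String × List (String × String)))
    (hpre : Pre_get_repeats key directions maps) : 0 < grLam key directions maps :=
  Function.minimalPeriod_pos_of_mem_periodicPts (grMu_spec key directions maps hpre)

-- stability: from index μ on, the orbit is periodic with period λ (any multiple)
theorem grOrb_stab (key : String) (directions : List String) (maps : List (String × List (String × String)))
    (_hpre : Pre_get_repeats key directions maps) (m q : Nat) (hm : grMu key directions maps ≤ m) :
    grOrb key directions maps (m + q * grLam key directions maps) = grOrb key directions maps m := by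
  have hp : Function.IsPeriodicPt (grStep directions maps) (grLam key directions maps)
      (grOrb key directions maps (grMu key directions maps)) :=
    Function.isPeriodicPt_minimalPeriod _ _
  have hm' : grOrb key directions maps m =
      (grStep directions maps)^[m - grMu key directions maps]
        (grOrb key directions maps (grMu key directions maps)) := by
    rw [← grOrb_add]
    congr 1
    omega
  have hpm : Function.IsPeriodicPt (grStep directions maps) (grLam key directions maps)
      (grOrb key directions maps m) := by
    rw [hm']
    exact hp.apply_iterate _
  have hq := hpm.mul_const q
  have : grOrb key directions maps (m + q * grLam key directions maps) =
      (grStep directions maps)^[grLam key directions maps * q] (grOrb key directions maps m) := by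
    rw [Nat.add_comm, grOrb_add]
    congr 1
    ring
  rw [this]
  exact hq

-- every equal pair of orbit points lies past μ and at a distance divisible by λ
theorem grOrb_pair (key : String) (directions : List String) (maps : List (String × List (String × String)))
    (hpre : Pre_get_repeats key directions maps) (a b : Nat) (hab : a < b)
    (he : grOrb key directions maps a = grOrb key directions maps b) :
    grMu key directions maps ≤ a ∧ grLam key directions maps ∣ (b - a) := by
  have hp : Function.IsPeriodicPt (grStep directions maps) (b - a) (grOrb key directions maps a) := by
    show (grStep directions maps)^[b - a] (grOrb key directions maps a) = grOrb key directions maps a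
    rw [← grOrb_add, show b - a + a = b from by omega, ← he]
  have hmem : grOrb key directions maps a ∈ Function.periodicPts (grStep directions maps) :=
    ⟨b - a, by omega, hp⟩
  have hmu : grMu key directions maps ≤ a := by
    by_contra hlt
    exact grMu_min key directions maps a (by omega) hmem
  refine ⟨hmu, ?_⟩
  have hdvd := hp.minimalPeriod_dvd
  have ha' : grOrb key directions maps a =
      (grStep directions maps)^[a - grMu key directions maps]
        (grOrb key directions maps (grMu key directions maps)) := by
    rw [← grOrb_add]
    congr 1
    omega
  have : Function.minimalPeriod (grStep directions maps) (grOrb key directions maps a) =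
      grLam key directions maps := by
    rw [ha', Function.minimalPeriod_apply_iterate (grMu_spec key directions maps hpre)]
    rfl
  rwa [this] at hdvd

theorem grMuLam_le (key : String) (directions : List String) (maps : List (String × List (String × String)))
    (hpre : Pre_get_repeats key directions maps) :
    grMu key directions maps + grLam key directions maps ≤ maps.length * directions.length := by
  obtain ⟨i, j, hij, hj, he⟩ := grOrb_repeats key directions maps hpre
  obtain ⟨hmu, hdvd⟩ := grOrb_pair key directions maps hpre i j hij he
  have hlam := Nat.le_of_dvd (by omega) hdvd
  omega

theorem grOrb_inj (key : String) (directions : List String) (maps : List (String × List (String × String)))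
    (hpre : Pre_get_repeats key directions maps) (a b : Nat) (hab : a < b)
    (hb : b < grMu key directions maps + grLam key directions maps) :
    grOrb key directions maps a ≠ grOrb key directions maps b := by
  intro he
  obtain ⟨hmu, hdvd⟩ := grOrb_pair key directions maps hpre a b hab he
  have hlam := Nat.le_of_dvd (by omega) hdvd
  omega

theorem grOrb_mu_lam (key : String) (directions : List String) (maps : List (String × List (String × String)))
    (hpre : Pre_get_repeats key directions maps) :
    grOrb key directions maps (grMu key directions maps + grLam key directions maps) =
      grOrb key directions maps (grMu key directions maps) := by
  have := grOrb_stab key directions maps hpre (grMu key directions maps) 1 (le_refl _)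
  simpa using this

-- ----- A side: the visited dictionary after t steps -----
def grTbl (key : String) (directions : List String) (maps : List (String × List (String × String)))
    (t : Nat) : PySem.Dict (String × Int) Int :=
  (List.range t).foldl (fun d k => d.insert (grOrb key directions maps k) (k : Int)) PySem.Dict.empty

theorem grTbl_succ (key : String) (directions : List String) (maps : List (String × List (String × String))) (t : Nat) :
    grTbl key directions maps (t+1) =
      (grTbl key directions maps t).insert (grOrb key directions maps t) (t : Int) := by
  simp [grTbl, List.range_succ]

theorem grTbl_get?_none (key : String) (directions : List String) (maps : List (String × List (String × String)))
    (t : Nat) (s : String × Int) (h : ∀ k < t, grOrb key directions maps k ≠ s) :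
    (grTbl key directions maps t).get? s = none := by
  induction t with
  | zero => simp [grTbl, PySem.Dict.get?_empty]
  | succ t ih =>
    rw [grTbl_succ, PySem.Dict.get?_insert]
    rw [if_neg (fun hc => h t (Nat.lt_succ_self t) hc.symm)]
    exact ih (fun k hk => h k (by omega))

theorem grTbl_get?_some (key : String) (directions : List String) (maps : List (String × List (String × String)))
    (t m : Nat) (s : String × Int) (hm : m < t) (hs : grOrb key directions maps m = s)
    (h : ∀ k < t, k ≠ m → grOrb key directions maps k ≠ s) :
    (grTbl key directions maps t).get? s = some (m : Int) := by
  induction t with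
  | zero => omega
  | succ t ih =>
    rw [grTbl_succ, PySem.Dict.get?_insert]
    by_cases hst : s = grOrb key directions maps t
    · have htm : t = m := by
        by_contra htm
        exact h t (Nat.lt_succ_self t) htm hst.symm
      rw [if_pos hst, htm]
    · rw [if_neg hst]
      have hmt : m < t := by
        rcases Nat.lt_or_ge m t with h' | h'
        · exact h'
        · exfalso
          have hmt : m = t := by omega
          subst hmt
          exact hst hs.symm
      exact ih hmt (fun k hk hkm => h k (by omega) hkm)

-- simulation of the inner `for` loop starting at direction index i = t % n
theorem grInner_sim (key : String) (directions : List String) (maps : List (String × List (String × String)))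
    (hpre : Pre_get_repeats key directions maps) :
    ∀ r i t : Nat, i + r = directions.length → (r = 0 ∨ i = t % directions.length) →
    t ≤ grMu key directions maps + grLam key directions maps →
    grInner maps ((PySem.List.enumerate directions).drop i) (grTbl key directions maps t)
        (grOrb key directions maps t).1 (t : Int) =
      if grMu key directions maps + grLam key directions maps < t + r then
        .inl ((grMu key directions maps : Int), (grLam key directions maps : Int))
      else
        .inr (grTbl key directions maps (t+r), (grOrb key directions maps (t+r)).1, ((t+r : Nat) : Int)) := by
  have hn : 0 < directions.length := List.length_pos_of_ne_nil hpre.1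
  have hlam : 0 < grLam key directions maps := grLam_pos key directions maps hpre
  intro r
  induction r with
  | zero =>
    intro i t hir _ ht
    have hdrop : (PySem.List.enumerate directions).drop i = [] := by
      apply List.drop_eq_nil_of_le
      rw [PySem.List.length_enumerate]
      omega
    rw [hdrop, if_neg (by omega)]
    simp [grInner]
  | succ r ih =>
    intro i t hir him ht
    replace him : i = t % directions.length := by
      rcases him with h | h
      · omega
      · exact h
    have hilt : i < directions.length := by omega
    have hdrop : (PySem.List.enumerate directions).drop i =
        ((i : Int), directions[i]) :: (PySem.List.enumerate directions).drop (i+1) := by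
      have hl : i < (PySem.List.enumerate directions).length := by
        rw [PySem.List.length_enumerate]; exact hilt
      rw [List.drop_eq_getElem_cons hl, PySem.List.getElem_enumerate]
      norm_num
    rw [hdrop]
    have hc2 := (grOrb_closure key directions maps hpre t).2
    have hkey : ((grOrb key directions maps t).1, ((i : Nat) : Int)) = grOrb key directions maps t := by
      refine Prod.ext rfl ?_
      rw [hc2, him]
    by_cases hteq : t = grMu key directions maps + grLam key directions maps
    · have hget : (grTbl key directions maps t).get? ((grOrb key directions maps t).1, ((i : Nat) : Int)) =
          some ((grMu key directions maps : Nat) : Int) := by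
        rw [hkey, hteq]
        refine grTbl_get?_some key directions maps _ _ _ (by omega)
          (grOrb_mu_lam key directions maps hpre).symm ?_
        intro k hk hkm he
        have he' : grOrb key directions maps k = grOrb key directions maps (grMu key directions maps) := by
          rw [he, grOrb_mu_lam key directions maps hpre]
        by_cases hkmu : k < grMu key directions maps
        · exact grOrb_inj key directions maps hpre k (grMu key directions maps)
            (by omega) (by omega) he'
        · exact grOrb_inj key directions maps hpre (grMu key directions maps) k
            (by omega) (by omega) he'.symm
      simp only [grInner, hget]
      rw [if_pos (by omega)]
      subst hteq
      congr 1
      refine Prod.ext rfl ?_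
      push_cast
      ring
    · have htlt : t < grMu key directions maps + grLam key directions maps := by omega
      have hget : (grTbl key directions maps t).get? ((grOrb key directions maps t).1, ((i : Nat) : Int)) = none := by
        rw [hkey]
        exact grTbl_get?_none key directions maps t _
          (fun k hk => grOrb_inj key directions maps hpre k t hk htlt)
      simp only [grInner, hget]
      have harg1 : (grTbl key directions maps t).insert ((grOrb key directions maps t).1, ((i : Nat) : Int)) ((t : Nat) : Int) =
          grTbl key directions maps (t+1) := by
        rw [hkey, grTbl_succ]
      have harg2 : (PySem.Dict.mk ((PySem.Dict.mk maps).getD (grOrb key directions maps t).1 [])).getD directions[i] "" =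
          (grOrb key directions maps (t+1)).1 := by
        rw [grOrb_succ]
        show _ = (grStep directions maps (grOrb key directions maps t)).1
        unfold grStep
        have hdir : PySem.List.pyGetD directions (grOrb key directions maps t).2 "" = directions[i] := by
          rw [hc2, PySem.List.pyGetD_natCast, ← him]
          exact List.getD_eq_getElem directions "" hilt
        rw [hdir]
      have harg3 : ((t : Nat) : Int) + 1 = (((t+1 : Nat)) : Int) := by push_cast; ring
      rw [harg1, harg2, harg3]
      have hdisj : r = 0 ∨ i + 1 = (t+1) % directions.length := by
        rcases Nat.lt_or_ge (i+1) directions.length with h | h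
        · right
          have hdm := Nat.div_add_mod t directions.length
          have ht1 : t + 1 = directions.length * (t / directions.length) + (i + 1) := by omega
          rw [ht1, Nat.mul_add_mod]
          exact (Nat.mod_eq_of_lt h).symm
        · left; omega
      have := ih (i+1) (t+1) (by omega) hdisj (by omega)
      rw [this, show t + 1 + r = t + (r + 1) from by omega]

theorem grOuter_sim (key : String) (directions : List String) (maps : List (String × List (String × String)))
    (hpre : Pre_get_repeats key directions maps) :
    ∀ fuel t : Nat, t % directions.length = 0 →
    t ≤ grMu key directions maps + grLam key directions maps →
    grMu key directions maps + grLam key directions maps < t + fuel * directions.length →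
    grOuter maps directions fuel (grTbl key directions maps t) (grOrb key directions maps t).1 (t : Int) =
      some ((grMu key directions maps : Int), (grLam key directions maps : Int)) := by
  have hn : 0 < directions.length := List.length_pos_of_ne_nil hpre.1
  intro fuel
  induction fuel with
  | zero =>
    intro t _ ht hbound
    omega
  | succ fuel ih =>
    intro t htm ht hbound
    have hsim := grInner_sim key directions maps hpre directions.length 0 t (by omega)
      (by omega) ht
    rw [List.drop_zero] at hsim
    simp only [grOuter, hsim]
    by_cases hcase : grMu key directions maps + grLam key directions maps < t + directions.length
    · rw [if_pos hcase]
    · rw [if_neg hcase]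
      have hmul : (fuel + 1) * directions.length = fuel * directions.length + directions.length := by
        ring
      exact ih (t + directions.length) (by rw [Nat.add_mod_right]; exact htm) (by omega) (by omega)

theorem get_repeats_eq (key : String) (directions : List String) (maps : List (String × List (String × String)))
    (hpre : Pre_get_repeats key directions maps) :
    get_repeats key directions maps =
      ((grMu key directions maps : Int), (grLam key directions maps : Int)) := by
  have hn : 0 < directions.length := List.length_pos_of_ne_nil hpre.1
  have hml := grMuLam_le key directions maps hpre
  have hmul : (maps.length + 2) * directions.length =
      maps.length * directions.length + 2 * directions.length := by ring
  have hsim := grOuter_sim key directions maps hpre (maps.length + 2) 0 (Nat.zero_mod _) (by omega)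
    (by omega)
  have htbl : grTbl key directions maps 0 = PySem.Dict.empty := rfl
  have horb : (grOrb key directions maps 0).1 = key := rfl
  rw [htbl, horb] at hsim
  norm_num at hsim
  unfold get_repeats
  rw [hsim]
  rfl

-- ----- B side -----
theorem grRace_eq (ft fh : (String × Int) → (String × Int)) (X Y : Nat → String × Int)
    (hX : ∀ c, X (c+1) = ft (X c)) (hY : ∀ c, Y (c+1) = fh (Y c)) (c0 : Nat) :
    ∀ fuel k, k ≤ c0 → X c0 = Y c0 → (∀ j, k ≤ j → j < c0 → X j ≠ Y j) → c0 < k + fuel →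
    grRace ft fh fuel (X k) (Y k) (k : Int) = some (X c0, Y c0, (c0 : Int)) := by
  intro fuel
  induction fuel with
  | zero => intro k hk _ _ hfuel; omega
  | succ fuel ih =>
    intro k hk hstop hmin hfuel
    simp only [grRace]
    by_cases hke : X k = Y k
    · have hkc : k = c0 := by
        by_contra hne
        exact hmin k (le_refl k) (by omega) hke
      rw [if_pos hke, hkc]
    · rw [if_neg hke]
      have hklt : k < c0 := by
        rcases Nat.lt_or_ge k c0 with h | h
        · exact h
        · have : k = c0 := by omega
          exact absurd (this ▸ hstop) hke
      have harg : (k : Int) + 1 = ((k + 1 : Nat) : Int) := by push_cast; ring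
      rw [← hX k, ← hY k, harg]
      exact ih (k+1) (by omega) hstop (fun j hj => hmin j (by omega)) (by omega)

theorem get_repeats_alt_eq (key : String) (directions : List String) (maps : List (String × List (String × String)))
    (hpre : Pre_get_repeats key directions maps) :
    get_repeats_alt key directions maps =
      ((grMu key directions maps : Int), (grLam key directions maps : Int)) := by
  have hn : 0 < directions.length := List.length_pos_of_ne_nil hpre.1
  have hlam : 0 < grLam key directions maps := grLam_pos key directions maps hpre
  have hml := grMuLam_le key directions maps hpre
  -- a meeting time exists: the first multiple of lam past mu (and ≥ 1)
  have hdm := Nat.div_add_mod (grMu key directions maps) (grLam key directions maps)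
  have hmlt := Nat.mod_lt (grMu key directions maps) hlam
  have hcs : grLam key directions maps * (grMu key directions maps / grLam key directions maps + 1)
      = grLam key directions maps * (grMu key directions maps / grLam key directions maps)
        + grLam key directions maps := by ring
  have hc1 : 1 ≤ grLam key directions maps * (grMu key directions maps / grLam key directions maps + 1) := by
    omega
  have hc2 : grMu key directions maps ≤
      grLam key directions maps * (grMu key directions maps / grLam key directions maps + 1) := by
    omega
  have hc3 : grLam key directions maps * (grMu key directions maps / grLam key directions maps + 1) ≤
      grMu key directions maps + grLam key directions maps := by
    omega
  have hcstab : grOrb key directions maps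
        (2 * (grLam key directions maps * (grMu key directions maps / grLam key directions maps + 1)))
      = grOrb key directions maps
        (grLam key directions maps * (grMu key directions maps / grLam key directions maps + 1)) := by
    rw [show 2 * (grLam key directions maps * (grMu key directions maps / grLam key directions maps + 1))
        = grLam key directions maps * (grMu key directions maps / grLam key directions maps + 1)
          + (grMu key directions maps / grLam key directions maps + 1) * grLam key directions maps
        from by ring]
    exact grOrb_stab key directions maps hpre _ _ hc2
  letI := Classical.decPred (fun c =>
    1 ≤ c ∧ grOrb key directions maps c = grOrb key directions maps (2*c))
  have hex : ∃ c, 1 ≤ c ∧ grOrb key directions maps c = grOrb key directions maps (2*c) :=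
    ⟨_, hc1, hcstab.symm⟩
  obtain ⟨ht01, ht0stop⟩ := Nat.find_spec hex
  have ht0min : ∀ j, 1 ≤ j → j < Nat.find hex →
      grOrb key directions maps j ≠ grOrb key directions maps (2*j) :=
    fun j h1 hj he => (Nat.find_min hex hj) ⟨h1, he⟩
  have ht0le : Nat.find hex ≤
      grLam key directions maps * (grMu key directions maps / grLam key directions maps + 1) :=
    Nat.find_le ⟨hc1, hcstab.symm⟩
  obtain ⟨ht0mu, ht0dvd⟩ := grOrb_pair key directions maps hpre
    (Nat.find hex) (2 * Nat.find hex) (by omega) ht0stop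
  have ht0dvd' : grLam key directions maps ∣ Nat.find hex := by
    rwa [show 2 * Nat.find hex - Nat.find hex = Nat.find hex from by omega] at ht0dvd
  -- phase 1
  have h1 := grRace_eq (grStep directions maps)
      (fun s => grStep directions maps (grStep directions maps s))
      (grOrb key directions maps) (fun c => grOrb key directions maps (2*c))
      (fun c => grOrb_succ key directions maps c)
      (fun c => by
        show grOrb key directions maps (2*(c+1))
          = grStep directions maps (grStep directions maps (grOrb key directions maps (2*c)))
        rw [show 2*(c+1) = (2*c+1)+1 from by ring, grOrb_succ, grOrb_succ])
      (Nat.find hex) (maps.length * directions.length + 2) 1 ht01 ht0stop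
      ht0min (by omega)
  have e1 : grOrb key directions maps 1 = grStep directions maps (key, (0 : Int)) := rfl
  have e2 : grOrb key directions maps 2 =
      grStep directions maps (grStep directions maps (key, (0 : Int))) := rfl
  norm_num at h1
  rw [e1, e2] at h1
  -- phase 2
  have hdvd2 : grLam key directions maps ∣ 2 * Nat.find hex := Dvd.dvd.mul_left ht0dvd' 2
  obtain ⟨q2, hq2⟩ := hdvd2
  have hstop2 : grOrb key directions maps (grMu key directions maps) =
      grOrb key directions maps (2 * Nat.find hex + grMu key directions maps) := by
    rw [show 2 * Nat.find hex + grMu key directions maps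
        = grMu key directions maps + q2 * grLam key directions maps
        from by rw [hq2]; ring]
    exact (grOrb_stab key directions maps hpre _ q2 (le_refl _)).symm
  have h2 := grRace_eq (grStep directions maps) (grStep directions maps)
      (grOrb key directions maps) (fun c => grOrb key directions maps (2 * Nat.find hex + c))
      (fun c => grOrb_succ key directions maps c)
      (fun c => by
        show grOrb key directions maps (2 * Nat.find hex + (c+1))
          = grStep directions maps (grOrb key directions maps (2 * Nat.find hex + c))
        rw [show 2 * Nat.find hex + (c+1) = (2 * Nat.find hex + c)+1 from by ring, grOrb_succ])
      (grMu key directions maps) (maps.length * directions.length + 2) 0 (Nat.zero_le _)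
      hstop2
      (fun j _ hj he =>
        absurd ((grOrb_pair key directions maps hpre j (2 * Nat.find hex + j) (by omega) he).1)
          (by omega))
      (by omega)
  have e0 : grOrb key directions maps 0 = (key, (0 : Int)) := rfl
  norm_num at h2
  rw [e0] at h2
  -- phase 3
  have hstop3 : grOrb key directions maps (grMu key directions maps) =
      grOrb key directions maps (grMu key directions maps + grLam key directions maps) :=
    (grOrb_mu_lam key directions maps hpre).symm
  have h3 := grRace_eq (fun s => s) (grStep directions maps)
      (fun _ => grOrb key directions maps (grMu key directions maps))
      (fun c => grOrb key directions maps (grMu key directions maps + c))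
      (fun c => rfl)
      (fun c => by
        show grOrb key directions maps (grMu key directions maps + (c+1))
          = grStep directions maps (grOrb key directions maps (grMu key directions maps + c))
        rw [show grMu key directions maps + (c+1) = (grMu key directions maps + c)+1 from by ring,
          grOrb_succ])
      (grLam key directions maps) (maps.length * directions.length + 2) 1 hlam
      hstop3
      (fun j h1j hj he => by
        have hd := (grOrb_pair key directions maps hpre (grMu key directions maps)
          (grMu key directions maps + j) (by omega) he).2
        rw [show grMu key directions maps + j - grMu key directions maps = j from by omega] at hd
        exact absurd (Nat.le_of_dvd (by omega) hd) (by omega))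
      (by omega)
  norm_num at h3
  rw [grOrb_succ key directions maps (grMu key directions maps)] at h3
  simp only [get_repeats_alt, h1, h2, h3]

-- ===== VERDICT (by name: the statement is the Claim_ definition above) =====
theorem get_repeats_spec : Claim_equal_get_repeats := by
  intro key directions maps _ hpre
  unfold Spec_get_repeats
  rw [get_repeats_eq key directions maps hpre, get_repeats_alt_eq key directions maps hpre]
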